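-- pv_equiv track=rewrite | github.com/pabloschwarzenberg/grader | tema12_ej1/tema12_ej1_4463aae0a063ef6b128a51d3db079414.py | to1
-- ===== SOURCE A (Python) =====
-- def to1(numb):
--     num=list(numb)
--     num.reverse()
--     for i in range(len(num)):
--         if num[i]=='0':
--             num[i]='1'
--             break
--     num.reverse()
--     num="".join(num)
--     return num
-- ===== SOURCE B (Python) =====
-- def to1(numb):
--     # One forward pass. Invariant: pre holds the output for everything up to and
--     # including the most recent '0' (provisionally replaced by... assembled at end),
--     # tail holds the characters seen since the most recent '0', seen says whether
--     # any '0' occurred. A later '0' restores the provisional one to '0'.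
--     pre, tail, seen = [], [], False
--     for c in numb:
--         if c == '0':
--             if seen:
--                 pre.append('0')
--                 pre.extend(tail)
--             else:
--                 pre.extend(tail)
--                 seen = True
--             tail = []
--         else:
--             tail.append(c)
--     if seen:
--         return ''.join(pre) + '1' + ''.join(tail)
--     return ''.join(pre) + ''.join(tail)
-- ===== Notes on version B (the rewrite author's own statement) =====
-- stated objective: alternative
-- what changed: Replaces the reverse/scan-with-break/reverse/join pipeline by a single forward fold over the characters maintaining an accumulator state (prefix, chars-since-last-zero, seen-flag), with the provisional replacement undone when a later '0' arrives; no reversal or backward search at all.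
import Mathlib
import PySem

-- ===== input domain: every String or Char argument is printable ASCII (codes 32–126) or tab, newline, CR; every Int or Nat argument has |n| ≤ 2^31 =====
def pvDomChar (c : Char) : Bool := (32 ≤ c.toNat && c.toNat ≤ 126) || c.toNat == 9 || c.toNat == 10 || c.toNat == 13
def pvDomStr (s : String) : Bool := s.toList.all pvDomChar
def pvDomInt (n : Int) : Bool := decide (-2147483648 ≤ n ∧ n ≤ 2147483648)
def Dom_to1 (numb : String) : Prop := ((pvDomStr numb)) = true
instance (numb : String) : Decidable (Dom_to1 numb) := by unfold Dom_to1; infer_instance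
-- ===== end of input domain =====

-- B replaces A's reverse/scan-with-break/reverse/join pipeline by one forward fold with an
-- undo-on-later-zero accumulator state (alternative decomposition, same cost).

-- ===== PORT A =====
-- the for-loop with break over the reversed list: replace the first '0' encountered, then stop
def to1Loop : List Char → List Char
  | [] => []
  | c :: rest => if c = '0' then '1' :: rest else c :: to1Loop rest

def to1 (numb : String) : String :=
  let num := numb.toList            -- num = list(numb)
  let num := num.reverse            -- num.reverse()
  let num := to1Loop num            -- for i in range(len(num)): if num[i]=='0': num[i]='1'; break
  let num := num.reverse            -- num.reverse()
  String.ofList num                 -- "".join(num)  (built on the char list; Lean's String.append is kernel-opaque)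

-- ===== PORT B =====
-- the loop body of Source B: state (pre, tail, seen)
def to1Step : List Char × List Char × Bool → Char → List Char × List Char × Bool
  | (pre, tail, seen), c =>
    if c = '0' then
      if seen then (pre ++ '0' :: tail, [], true)   -- pre.append('0'); pre.extend(tail); tail=[]
      else (pre ++ tail, [], true)                  -- pre.extend(tail); seen=True; tail=[]
    else (pre, tail ++ [c], seen)                   -- tail.append(c)

def to1_alt (numb : String) : String :=
  let st := numb.toList.foldl to1Step ([], [], false)
  if st.2.2 then String.ofList (st.1 ++ '1' :: st.2.1)   -- ''.join(pre)+'1'+''.join(tail)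
  else String.ofList (st.1 ++ st.2.1)                    -- ''.join(pre)+''.join(tail)

-- ===== PRECONDITION & SPEC =====
def Spec_to1 (numb : String) (out : String) : Prop := out = to1_alt numb
instance (numb : String) (out : String) : Decidable (Spec_to1 numb out) := by unfold Spec_to1; infer_instance

-- ===== CLAIM (what is proved, stated in full; the proofs are below) =====
def Claim_equal_to1 : Prop := ∀ (numb : String), Dom_to1 numb → Spec_to1 numb (to1 numb)

-- ===== LEMMAS AND PROOFS =====

-- ghost specification: replace the last '0' by '1' (identity if none)
def RL : List Char → List Char
  | [] => []
  | c :: rest => if c = '0' ∧ '0' ∉ rest then '1' :: rest else c :: RL rest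

-- assembling B's final state
def asm (st : List Char × List Char × Bool) : List Char :=
  if st.2.2 then st.1 ++ '1' :: st.2.1 else st.1 ++ st.2.1

theorem RL_cons_ne (c : Char) (rest : List Char) (h : ¬ (c = '0' ∧ '0' ∉ rest)) :
    RL (c :: rest) = c :: RL rest := by
  rw [RL, if_neg h]

theorem RL_no_zero (l : List Char) (h : '0' ∉ l) : RL l = l := by
  induction l with
  | nil => rfl
  | cons c rest ih =>
    simp only [List.mem_cons, not_or] at h
    rw [RL_cons_ne c rest (fun hx => h.1 hx.1.symm), ih h.2]

theorem RL_split (a d : List Char) (hd : '0' ∉ d) :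
    RL (a ++ '0' :: d) = a ++ '1' :: d := by
  induction a with
  | nil => simp [RL, hd]
  | cons c rest ih =>
    have hm : '0' ∈ rest ++ '0' :: d := by simp
    rw [List.cons_append, RL_cons_ne c _ (fun hx => hx.2 hm), ih]
    rfl

theorem to1Loop_no_zero (l : List Char) (h : '0' ∉ l) : to1Loop l = l := by
  induction l with
  | nil => rfl
  | cons c rest ih =>
    simp only [List.mem_cons, not_or] at h
    simp [to1Loop, (Ne.symm h.1 : c ≠ '0'), ih h.2]

theorem to1Loop_split (a b : List Char) (h : '0' ∉ a) :
    to1Loop (a ++ '0' :: b) = a ++ '1' :: b := by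
  induction a with
  | nil => simp [to1Loop]
  | cons c rest ih =>
    simp only [List.mem_cons, not_or] at h
    simp [to1Loop, (Ne.symm h.1 : c ≠ '0'), ih h.2]

theorem exists_first_zero (l : List Char) (h : '0' ∈ l) :
    ∃ a b, l = a ++ '0' :: b ∧ '0' ∉ a := by
  induction l with
  | nil => simp at h
  | cons c rest ih =>
    by_cases hc : c = '0'
    · exact ⟨[], rest, by simp [hc], by simp⟩
    · obtain ⟨a, b, hab, hna⟩ := ih (by
        rcases List.mem_cons.mp h with h | h
        · exact absurd h.symm hc
        · exact h)
      exact ⟨c :: a, b, by simp [hab],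
        by simp only [List.mem_cons, not_or]; exact ⟨fun e => hc (Eq.symm e), hna⟩⟩

theorem exists_last_zero (l : List Char) (h : '0' ∈ l) :
    ∃ a b, l = a ++ '0' :: b ∧ '0' ∉ b := by
  obtain ⟨a, b, hab, hna⟩ := exists_first_zero l.reverse (by simpa using h)
  refine ⟨b.reverse, a.reverse, ?_, by simpa using hna⟩
  have := congrArg List.reverse hab
  simpa using this

-- the fold, once a '0' has been seen
theorem fold_true (l : List Char) : ∀ (pre tail : List Char),
    asm (l.foldl to1Step (pre, tail, true)) =
      pre ++ (if '0' ∈ l then '0' :: (tail ++ RL l) else '1' :: (tail ++ l)) := by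
  induction l with
  | nil => intro pre tail; simp [asm]
  | cons c rest ih =>
    intro pre tail
    rw [List.foldl_cons]
    by_cases hc : c = '0'
    · subst hc
      have hstep : to1Step (pre, tail, true) '0' = (pre ++ '0' :: tail, [], true) := by
        simp [to1Step]
      rw [hstep, ih]
      by_cases hr : '0' ∈ rest
      · simp [hr, RL]
      · simp [hr, RL]
    · have hstep : to1Step (pre, tail, true) c = (pre, tail ++ [c], true) := by
        simp [to1Step, hc]
      rw [hstep, ih]
      have hRL := RL_cons_ne c rest (fun hx => hc hx.1)
      by_cases hr : '0' ∈ rest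
      · simp [hr, hRL]
      · simp [hr, (Ne.symm hc : '0' ≠ c)]

-- the fold before any '0' has been seen
theorem fold_false (l : List Char) : ∀ (pre tail : List Char),
    asm (l.foldl to1Step (pre, tail, false)) = pre ++ tail ++ RL l := by
  induction l with
  | nil => intro pre tail; simp [asm, RL]
  | cons c rest ih =>
    intro pre tail
    rw [List.foldl_cons]
    by_cases hc : c = '0'
    · subst hc
      have hstep : to1Step (pre, tail, false) '0' = (pre ++ tail, [], true) := by
        simp [to1Step]
      rw [hstep, fold_true]
      by_cases hr : '0' ∈ rest
      · simp [hr, RL]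
      · simp [hr, RL]
    · have hstep : to1Step (pre, tail, false) c = (pre, tail ++ [c], false) := by
        simp [to1Step, hc]
      rw [hstep, ih, RL_cons_ne c rest (fun hx => hc hx.1)]
      simp

theorem to1_alt_eq (numb : String) : to1_alt numb = String.ofList (RL numb.toList) := by
  have h := fold_false numb.toList [] []
  unfold to1_alt
  unfold asm at h
  split_ifs at h ⊢ <;> simp_all

theorem to1_eq (numb : String) : to1 numb = String.ofList (RL numb.toList) := by
  show String.ofList ((to1Loop numb.toList.reverse).reverse) = _
  by_cases h : '0' ∈ numb.toList
  · obtain ⟨a, d, hl, hd⟩ := exists_last_zero numb.toList h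
    rw [hl, RL_split a d hd]
    have hrev : (a ++ '0' :: d).reverse = d.reverse ++ '0' :: a.reverse := by simp
    rw [hrev, to1Loop_split _ _ (by simpa using hd)]
    simp
  · rw [RL_no_zero _ h, to1Loop_no_zero _ (by simpa using h)]
    simp

-- ===== VERDICT (by name: the statement is the Claim_ definition above) =====
theorem to1_spec : Claim_equal_to1 := by
  intro numb _
  unfold Spec_to1
  rw [to1_eq, to1_alt_eq]
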